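-- pv_equiv track=rewrite | github.com/viraj-shah18/Twitter-Analysis | utils.py | add_comas
-- ===== SOURCE A (Python) =====
-- def add_comas(num):
--     ans = ""
--     pl = 0
--     for a in reversed(str(num)):
--         if pl == 3:
--             ans += ","
--         elif pl > 3 and (pl - 3) % 2 == 0:
--             ans += ","
--         ans += a
--         pl += 1
--     return ans[::-1]
-- ===== SOURCE B (Python) =====
-- def add_comas(num):
--     r = str(num)[::-1]
--     groups = [r[:3]]
--     i = 3
--     while i < len(r):
--         groups.append(r[i:i + 2])
--         i += 2
--     return ",".join(groups)[::-1]
-- ===== Notes on version B (the rewrite author's own statement) =====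
-- stated objective: simpler
-- what changed: B replaces A's per-character counter loop (comma decided by modular tests on a running position counter) with chunking the reversed string into one three-character group plus two-character groups and a single comma join.
import Mathlib
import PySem

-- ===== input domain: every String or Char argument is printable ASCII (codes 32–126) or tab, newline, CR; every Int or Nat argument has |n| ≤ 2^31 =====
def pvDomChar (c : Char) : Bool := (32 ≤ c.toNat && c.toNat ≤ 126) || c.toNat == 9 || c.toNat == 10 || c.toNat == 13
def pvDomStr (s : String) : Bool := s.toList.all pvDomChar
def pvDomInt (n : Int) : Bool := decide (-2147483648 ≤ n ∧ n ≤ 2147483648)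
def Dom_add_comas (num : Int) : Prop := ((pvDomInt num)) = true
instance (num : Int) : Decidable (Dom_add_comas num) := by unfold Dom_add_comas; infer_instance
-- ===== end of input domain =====

-- B builds the comma-groups by chunking the reversed digit string (3 then 2s) and joining,
-- instead of A's per-character counter loop; objective: simpler decomposition, same output.


-- ===== PORT A =====
-- one iteration of A's loop body: maybe append ',', then the char, bump the counter
def addComasStep (s : List Char × Nat) (a : Char) : List Char × Nat :=
  let ans := if s.2 = 3 then s.1 ++ [',']
             else if 3 < s.2 ∧ (s.2 - 3) % 2 = 0 then s.1 ++ [',']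
             else s.1
  (ans ++ [a], s.2 + 1)

def add_comas (num : Int) : String :=
  String.ofList ((PySem.Int.toStr num).toList.reverse.foldl addComasStep ([], 0)).1.reverse

-- ===== PORT B =====
-- Source B's while loop: peel two characters at a time from r[3:]
def chunk2 : List Char → List (List Char)
  | [] => []
  | [x] => [[x]]
  | x :: y :: rest => [x, y] :: chunk2 rest

-- ",".join(groups) (groups is nonempty by construction)
def joinComma : List (List Char) → List Char
  | [] => []
  | g :: rest => rest.foldl (fun acc h => acc ++ ',' :: h) g

def add_comas_alt (num : Int) : String :=
  let r := (PySem.Int.toStr num).toList.reverse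
  (joinComma (r.take 3 :: chunk2 (r.drop 3))).reverse |> String.ofList

-- ===== PRECONDITION & SPEC =====
def Spec_add_comas (num : Int) (out : String) : Prop := out = add_comas_alt num
instance (num : Int) (out : String) : Decidable (Spec_add_comas num out) := by unfold Spec_add_comas; infer_instance

-- ===== CLAIM (what is proved, stated in full; the proofs are below) =====
def Claim_equal_add_comas : Prop := ∀ (num : Int), Dom_add_comas num → Spec_add_comas num (add_comas num)

-- ===== LEMMAS AND PROOFS =====

-- From counter 2*k+3 on, A appends ',' before every other char: exactly chunk2's groups.
theorem loop2 (rest : List Char) : ∀ (ans : List Char) (k : Nat),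
    (rest.foldl addComasStep (ans, 2 * k + 3)).1
      = (chunk2 rest).foldl (fun acc h => acc ++ ',' :: h) ans := by
  induction rest using chunk2.induct with
  | case1 => intro ans k; simp [chunk2]
  | case2 x =>
      intro ans k
      simp only [List.foldl, addComasStep, chunk2]
      split_ifs with h1 h2 <;> simp <;> omega
  | case3 x y rest ih =>
      intro ans k
      simp only [List.foldl, addComasStep, chunk2]
      split_ifs with h1 h2 h3 h4 h3 h4 <;> try omega
      all_goals {
        have := ih (ans ++ [','] ++ [x] ++ [y]) (k + 1)
        simp only [show 2 * k + 3 + 1 + 1 = 2 * (k + 1) + 3 by omega] at *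
        simpa using this }

-- The whole loop equals B's chunk-and-join, for any character list.
theorem loop_eq (xs : List Char) :
    (xs.foldl addComasStep ([], 0)).1
      = joinComma (xs.take 3 :: chunk2 (xs.drop 3)) := by
  match xs with
  | [] => simp [chunk2, joinComma]
  | [a] => simp [addComasStep, chunk2, joinComma]
  | [a, b] => simp [addComasStep, chunk2, joinComma]
  | a :: b :: c :: rest =>
      simp only [List.foldl, addComasStep]
      norm_num
      have := loop2 rest [a, b, c] 0
      norm_num at this
      simpa [joinComma] using this

-- ===== VERDICT (by name: the statement is the Claim_ definition above) =====
theorem add_comas_spec : Claim_equal_add_comas := by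
  intro num _
  unfold Spec_add_comas add_comas add_comas_alt
  rw [loop_eq]
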